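-- pv_equiv track=rewrite | github.com/jmoh3/TransitionTreesComplexity | reconstruct_permutation.py | reconstruct_permutation
-- ===== SOURCE A (Python) =====
-- import bisect
--
-- def reconstruct_permutation(l):
--     w = [l[0]+1]
--     sorted_w = [l[0]+1]
--
--     for boxes in l[1:]:
--         counter = boxes + 1
--         idx = 0
--         while idx < len(sorted_w) and sorted_w[idx] <= counter:
--             counter += 1
--             idx += 1
--         to_add = counter
--         w.append(to_add)
--         bisect.insort(sorted_w, to_add)
--
--     return w
-- ===== SOURCE B (Python) =====
-- def reconstruct_permutation(l):
--     # One uniform loop; per step a binary search on the invariant s[i]-i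
--     # (nondecreasing since s holds distinct sorted values) replaces A's linear scan.
--     w = []
--     s = []
--     for boxes in l:
--         c = boxes + 1
--         lo, hi = 0, len(s)
--         while lo < hi:
--             mid = (lo + hi) // 2
--             if s[mid] - mid <= c:
--                 lo = mid + 1
--             else:
--                 hi = mid
--         v = c + lo
--         w.append(v)
--         s.insert(lo, v)
--     return w
-- ===== Notes on version B (the rewrite author's own statement) =====
-- stated objective: faster
-- what changed: Replaces A's per-step linear counter-bumping scan over the sorted list with a binary search on the monotone quantity s[i]-i (the placed values are always distinct, so s[i]-i is nondecreasing), and treats the first element by the same uniform loop instead of a special-cased initialisation; the remaining list insert is a C-level memmove.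
import Mathlib
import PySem

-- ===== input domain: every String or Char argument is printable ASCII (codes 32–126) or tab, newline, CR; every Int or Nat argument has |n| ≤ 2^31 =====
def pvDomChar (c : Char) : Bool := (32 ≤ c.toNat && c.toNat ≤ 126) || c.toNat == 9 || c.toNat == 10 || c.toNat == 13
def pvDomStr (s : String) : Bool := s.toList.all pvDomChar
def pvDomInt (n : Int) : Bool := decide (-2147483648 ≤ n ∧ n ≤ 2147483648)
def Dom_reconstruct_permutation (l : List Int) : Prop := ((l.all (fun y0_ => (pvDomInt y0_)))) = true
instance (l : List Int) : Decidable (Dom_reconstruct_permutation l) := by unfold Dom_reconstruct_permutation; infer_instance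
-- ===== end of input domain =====

-- B replaces A's per-step linear counter-bumping scan with a binary search on the
-- monotone quantity s[i]-i (placed values are distinct and sorted), uniform loop; faster in a timing run.


-- ===== PORT A =====
-- A's inner while loop: skip sorted elements ≤ the moving counter, bumping it.
def pvScanA : List Int → Int → Int
  | [], counter => counter
  | x :: xs, counter => if x ≤ counter then pvScanA xs (counter + 1) else counter

-- bisect.insort: insert before the first element strictly greater than v.
def pvInsort : List Int → Int → List Int
  | [], v => [v]
  | x :: xs, v => if v < x then v :: x :: xs else x :: pvInsort xs v

def reconstruct_permutation (l : List Int) : List Int :=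
  match l with
  | [] => []          -- Python raises IndexError on l[0]; excluded by Pre_
  | h :: _ =>
    let st := (PySem.List.slice l (some 1) none).foldl
      (fun (st : List Int × List Int) boxes =>
        let to_add := pvScanA st.2 (boxes + 1)
        (st.1 ++ [to_add], pvInsort st.2 to_add))
      ([h + 1], [h + 1])
    st.1

-- ===== PORT B =====
-- Source B's while-loop binary search: first index lo in [lo,hi) with s[lo] - lo > c.
-- s.getD mid 0: Source B only calls this with hi ≤ len(s), so mid is in range and
-- Python's s[mid] is exact there.
def pvBsearch (s : List Int) (c : Int) (lo hi : Nat) : Nat :=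
  if _h : lo < hi then
    let mid := (lo + hi) / 2
    if s.getD mid 0 - (mid : Int) ≤ c then pvBsearch s c (mid + 1) hi
    else pvBsearch s c lo mid
  else lo
termination_by hi - lo

def reconstruct_permutation_alt (l : List Int) : List Int :=
  (l.foldl
    (fun (st : List Int × List Int) boxes =>
      let c := boxes + 1
      let lo := pvBsearch st.2 c 0 st.2.length
      let v := c + (lo : Int)
      (st.1 ++ [v], PySem.List.insert st.2 (lo : Int) v))
    ([], [])).1

-- ===== PRECONDITION & SPEC =====
-- A raises IndexError on the empty list (l[0]); that is the only exception.
def Pre_reconstruct_permutation (l : List Int) : Prop := l ≠ []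
instance (l : List Int) : Decidable (Pre_reconstruct_permutation l) := by unfold Pre_reconstruct_permutation; infer_instance
def pvWitness_reconstruct_permutation : List Int := [1, 0, 2]

def Spec_reconstruct_permutation (l : List Int) (out : List Int) : Prop := out = reconstruct_permutation_alt l
instance (l : List Int) (out : List Int) : Decidable (Spec_reconstruct_permutation l out) := by unfold Spec_reconstruct_permutation; infer_instance

-- ===== CLAIM (what is proved, stated in full; the proofs are below) =====
def Claim_equal_reconstruct_permutation : Prop := ∀ (l : List Int), Dom_reconstruct_permutation l → Pre_reconstruct_permutation l → Spec_reconstruct_permutation l (reconstruct_permutation l)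

-- ===== LEMMAS AND PROOFS =====

-- Number of elements A's scan skips.
def pvK : List Int → Int → Nat
  | [], _ => 0
  | x :: xs, c => if x ≤ c then pvK xs (c + 1) + 1 else 0

theorem pvScanA_eq_add_K (s : List Int) (c : Int) : pvScanA s c = c + (pvK s c : Int) := by
  induction s generalizing c with
  | nil => simp [pvScanA, pvK]
  | cons x xs ih =>
    simp only [pvScanA, pvK]
    split_ifs with h
    · rw [ih]; push_cast; ring
    · simp

theorem pvK_le_length (s : List Int) (c : Int) : pvK s c ≤ s.length := by
  induction s generalizing c with
  | nil => simp [pvK]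
  | cons x xs ih =>
    simp only [pvK]
    split_ifs with h
    · simpa using ih (c + 1)
    · simp

theorem pvK_below (s : List Int) (c : Int) : ∀ i, i < pvK s c → s.getD i 0 ≤ c + (i : Int) := by
  induction s generalizing c with
  | nil => simp [pvK]
  | cons x xs ih =>
    intro i hi
    simp only [pvK] at hi
    split_ifs at hi with h
    · cases i with
      | zero => simpa using h
      | succ j =>
        have := ih (c + 1) j (by omega)
        rw [List.getD_cons_succ]
        push_cast
        push_cast at this
        linarith
    · omega

theorem pvK_stop (s : List Int) (c : Int) :
    pvK s c < s.length → c + (pvK s c : Int) < s.getD (pvK s c) 0 := by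
  induction s generalizing c with
  | nil => intro h; simp [pvK] at h
  | cons x xs ih =>
    intro h
    by_cases hx : x ≤ c
    · simp only [pvK, hx, if_true, List.length_cons] at h ⊢
      rw [List.getD_cons_succ]
      have := ih (c + 1) (by omega)
      push_cast
      push_cast at this
      linarith
    · simp only [pvK, hx, if_false] at h ⊢
      simp only [List.getD_cons_zero, Nat.cast_zero, add_zero]
      omega

-- strict sortedness propagates gaps: s[i] + (j-i) ≤ s[j]
theorem pvChain (s : List Int) (hs : s.Pairwise (· < ·)) :
    ∀ i j, i ≤ j → j < s.length → s.getD i 0 + ((j : Int) - (i : Int)) ≤ s.getD j 0 := by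
  intro i j hij hj
  induction j with
  | zero =>
    interval_cases i
    simp
  | succ j ihj =>
    rcases Nat.lt_or_ge i (j + 1) with hlt | hge
    · have hj' : j < s.length := by omega
      have step : s.getD j 0 < s.getD (j + 1) 0 := by
        have := List.pairwise_iff_getElem.mp hs j (j + 1) hj' hj (by omega)
        simpa [List.getD_eq_getElem?_getD, List.getElem?_eq_getElem, hj, hj'] using this
      have := ihj (by omega) hj'
      push_cast
      push_cast at this
      linarith
    · have : i = j + 1 := by omega
      subst this
      simp

theorem pvBsearch_eq (s : List Int) (c : Int) (k : Nat)
    (hbelow : ∀ i, i < k → s.getD i 0 ≤ c + (i : Int))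
    (habove : ∀ i, k ≤ i → i < s.length → c + (i : Int) < s.getD i 0) :
    ∀ n lo hi, hi - lo = n → lo ≤ k → k ≤ hi → hi ≤ s.length → pvBsearch s c lo hi = k := by
  intro n
  induction n using Nat.strong_induction_on with
  | _ n ih =>
    intro lo hi hn hlo hk hhi
    rw [pvBsearch]
    split_ifs with hlt
    · have hmid : (lo + hi) / 2 < hi := by omega
      have hmidlo : lo ≤ (lo + hi) / 2 := by omega
      set mid := (lo + hi) / 2 with hmiddef
      by_cases hP : s.getD mid 0 - (mid : Int) ≤ c
      · simp only [hP, if_true]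
        have hmk : mid < k := by
          by_contra hge
          have := habove mid (by omega) (by omega)
          omega
        exact ih (hi - (mid + 1)) (by omega) (mid + 1) hi rfl (by omega) hk hhi
      · simp only [hP, if_false]
        have hmk : k ≤ mid := by
          by_contra hgt
          have := hbelow mid (by omega)
          omega
        exact ih (mid - lo) (by omega) lo mid rfl hlo hmk (by omega)
    · omega

theorem pvInsort_eq_insertIdx (s : List Int) (v : Int) :
    ∀ k, k ≤ s.length → (∀ i, i < k → s.getD i 0 < v) →
      (∀ _h : k < s.length, v < s.getD k 0) →
      pvInsort s v = s.take k ++ v :: s.drop k := by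
  induction s with
  | nil =>
    intro k hk _ _
    have hk0 : k = 0 := by simpa using hk
    subst hk0
    simp [pvInsort]
  | cons x xs ih =>
    intro k hk h1 h2
    cases k with
    | zero =>
      have hv : v < x := by simpa using h2 (by simp)
      simp [pvInsort, hv]
    | succ k' =>
      have hx : x < v := by simpa using h1 0 (by omega)
      have hxv : ¬ v < x := by omega
      simp only [pvInsort, hxv, if_false, List.take_succ_cons, List.drop_succ_cons,
        List.cons_append]
      congr 1
      exact ih k' (by simpa using hk)
        (fun i hi => by simpa using h1 (i + 1) (by omega))
        (fun h => by simpa using h2 (by simpa using h))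

-- the two step functions agree on a strictly sorted s, and preserve sortedness
theorem pvStep_agree (w s : List Int) (hs : s.Pairwise (· < ·)) (b : Int) :
    (let to_add := pvScanA s (b + 1)
     ((w ++ [to_add], pvInsort s to_add) : List Int × List Int))
    = (let c := b + 1
       let lo := pvBsearch s c 0 s.length
       let v := c + (lo : Int)
       (w ++ [v], PySem.List.insert s (lo : Int) v))
    ∧ (pvInsort s (pvScanA s (b + 1))).Pairwise (· < ·) := by
  set c := b + 1
  set k := pvK s c with hkdef
  have hkle : k ≤ s.length := pvK_le_length s c
  have hbelow := pvK_below s c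
  have habove : ∀ i, k ≤ i → i < s.length → c + (i : Int) < s.getD i 0 := by
    intro i hki hi
    have hstop := pvK_stop s c (by omega)
    have hchain := pvChain s hs k i hki hi
    push_cast at *
    linarith
  have hbs : pvBsearch s c 0 s.length = k :=
    pvBsearch_eq s c k hbelow habove (s.length - 0) 0 s.length rfl (by omega) hkle le_rfl
  have hscan : pvScanA s c = c + (k : Int) := pvScanA_eq_add_K s c
  have hlt : ∀ i, i < k → s.getD i 0 < c + (k : Int) := by
    intro i hi
    have := hbelow i hi
    omega
  have hgt : ∀ h : k < s.length, c + (k : Int) < s.getD k 0 := by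
    intro h
    exact pvK_stop s c h
  have hins : pvInsort s (c + (k : Int)) = s.take k ++ (c + (k : Int)) :: s.drop k :=
    pvInsort_eq_insertIdx s _ k hkle hlt hgt
  constructor
  · simp only [hbs, hscan, hins, PySem.List.insert_natCast s k _ hkle]
  · rw [hscan, hins]
    set v := c + (k : Int)
    have htake : ∀ x ∈ s.take k, x < v := by
      intro x hx
      obtain ⟨i, hi, hxi⟩ := List.getElem_of_mem hx
      have hik : i < k := by simp at hi; omega
      have his : i < s.length := by simp at hi; omega
      have : s.getD i 0 = x := by
        rw [← hxi, List.getElem_take]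
        simp [List.getD_eq_getElem?_getD, List.getElem?_eq_getElem his]
      exact this ▸ hlt i hik
    have hdrop : ∀ x ∈ s.drop k, v < x := by
      intro x hx
      obtain ⟨i, hi, hxi⟩ := List.getElem_of_mem hx
      rw [List.getElem_drop] at hxi
      have hlen : k + i < s.length := by
        have := hi; simp [List.length_drop] at this; omega
      have hx' : s.getD (k + i) 0 = x := by
        rw [← hxi]
        simp [List.getD_eq_getElem?_getD, List.getElem?_eq_getElem hlen]
      have := habove (k + i) (by omega) hlen
      push_cast at this
      omega
    have hsp : (s.take k ++ s.drop k).Pairwise (· < ·) := by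
      rw [List.take_append_drop]; exact hs
    rw [List.pairwise_append] at hsp
    rw [List.pairwise_append]
    refine ⟨hsp.1, ?_, ?_⟩
    · rw [List.pairwise_cons]
      exact ⟨hdrop, hsp.2.1⟩
    · intro a ha b' hb'
      rcases List.mem_cons.mp hb' with hb' | hb'
      · exact hb' ▸ htake a ha
      · exact hsp.2.2 a ha b' hb'

theorem pvFold_agree (rest : List Int) :
    ∀ w s, s.Pairwise (· < ·) →
      (rest.foldl
        (fun (st : List Int × List Int) boxes =>
          let to_add := pvScanA st.2 (boxes + 1)
          (st.1 ++ [to_add], pvInsort st.2 to_add)) (w, s))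
      = (rest.foldl
          (fun (st : List Int × List Int) boxes =>
            let c := boxes + 1
            let lo := pvBsearch st.2 c 0 st.2.length
            let v := c + (lo : Int)
            (st.1 ++ [v], PySem.List.insert st.2 (lo : Int) v)) (w, s)) := by
  induction rest with
  | nil => intro w s _; rfl
  | cons b bs ih =>
    intro w s hs
    obtain ⟨hstep, hsorted⟩ := pvStep_agree w s hs b
    simp only [List.foldl_cons]
    rw [← hstep]
    exact ih _ _ hsorted

-- ===== VERDICT (by name: the statement is the Claim_ definition above) =====
theorem reconstruct_permutation_spec : Claim_equal_reconstruct_permutation := by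
  intro l _ hpre
  unfold Spec_reconstruct_permutation
  match l with
  | [] => exact absurd rfl hpre
  | h :: t =>
    unfold reconstruct_permutation reconstruct_permutation_alt
    simp only [PySem.List.slice_from_one, List.tail_cons, List.foldl_cons]
    have hfirst :
        (let c := h + 1
         let lo := pvBsearch ([] : List Int) c 0 ([] : List Int).length
         let v := c + (lo : Int)
         ((([] : List Int) ++ [v], PySem.List.insert ([] : List Int) (lo : Int) v) : List Int × List Int))
        = ([h + 1], [h + 1]) := by
      simp [pvBsearch, PySem.List.insert_zero]
    rw [hfirst]
    rw [pvFold_agree t [h + 1] [h + 1] (by simp)]
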